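-- pv_equiv track=rewrite | github.com/ZaltronS/JP-e-Kaua | programa.py | guardar_dado
-- ===== SOURCE A (Python) =====
-- def guardar_dado(dados_rolados, dados_no_estoque, dado_para_guardar):
--     novos_dados_rolados = []
--     for i in range(len(dados_rolados)):
--         if i != dado_para_guardar:
--             novos_dados_rolados.append(dados_rolados[i])
--         else:
--             dado = dados_rolados[i]
--             dados_no_estoque.append(dado)
--     return [novos_dados_rolados, dados_no_estoque]
-- ===== SOURCE B (Python) =====
-- def guardar_dado(dados_rolados, dados_no_estoque, dado_para_guardar):
--     if 0 <= dado_para_guardar < len(dados_rolados):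
--         idx = dado_para_guardar
--         dados_no_estoque.append(dados_rolados[idx])
--         novos = dados_rolados[:idx] + dados_rolados[idx + 1:]
--     else:
--         novos = dados_rolados[:]
--     return [novos, dados_no_estoque]
-- ===== Notes on version B (the rewrite author's own statement) =====
-- stated objective: simpler
-- what changed: Replaced the element-by-element index-comparison loop with a single guarded slice decomposition: novos = dados_rolados[:idx] + dados_rolados[idx+1:] when the index is in range, a plain copy otherwise.
import Mathlib
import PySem

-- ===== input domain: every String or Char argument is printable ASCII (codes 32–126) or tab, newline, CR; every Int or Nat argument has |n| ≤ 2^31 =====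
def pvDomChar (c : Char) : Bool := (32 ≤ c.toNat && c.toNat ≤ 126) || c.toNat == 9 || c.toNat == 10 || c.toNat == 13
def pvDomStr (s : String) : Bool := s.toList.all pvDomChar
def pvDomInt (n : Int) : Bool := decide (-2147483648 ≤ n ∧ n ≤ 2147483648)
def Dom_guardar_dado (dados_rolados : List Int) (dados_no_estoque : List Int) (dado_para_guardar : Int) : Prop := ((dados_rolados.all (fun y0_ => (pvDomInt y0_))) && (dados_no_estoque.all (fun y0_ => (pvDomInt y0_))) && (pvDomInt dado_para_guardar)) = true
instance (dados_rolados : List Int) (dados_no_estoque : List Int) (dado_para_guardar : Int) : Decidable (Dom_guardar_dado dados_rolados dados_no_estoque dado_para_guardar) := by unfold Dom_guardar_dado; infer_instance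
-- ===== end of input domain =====

-- B replaces A's per-index comparison loop by a guarded two-slice decomposition (simpler);
-- both Pythons mutate dados_no_estoque identically (one append when the index is in range).

-- ===== PORT A =====
-- the loop body: state = (novos_dados_rolados, dados_no_estoque)
def guardarStep (dados_rolados : List Int) (dado_para_guardar : Int)
    (st : List Int × List Int) (i : Int) : List Int × List Int :=
  if i ≠ dado_para_guardar then
    (st.1 ++ [PySem.List.pyGetD dados_rolados i 0], st.2)
  else
    (st.1, st.2 ++ [PySem.List.pyGetD dados_rolados i 0])

def guardar_dado (dados_rolados : List Int) (dados_no_estoque : List Int) (dado_para_guardar : Int) : List (List Int) :=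
  let st := (PySem.List.pyRange 0 (PySem.List.len dados_rolados) 1).foldl
    (guardarStep dados_rolados dado_para_guardar) ([], dados_no_estoque)
  [st.1, st.2]

-- ===== PORT B =====
def guardar_dado_alt (dados_rolados : List Int) (dados_no_estoque : List Int) (dado_para_guardar : Int) : List (List Int) :=
  if 0 ≤ dado_para_guardar ∧ dado_para_guardar < PySem.List.len dados_rolados then
    let estoque := dados_no_estoque ++ (PySem.List.pyGet? dados_rolados dado_para_guardar).toList
    let novos := PySem.List.slice dados_rolados none (some dado_para_guardar)
               ++ PySem.List.slice dados_rolados (some (dado_para_guardar + 1)) none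
    [novos, estoque]
  else
    [PySem.List.slice dados_rolados none none, dados_no_estoque]

-- ===== PRECONDITION & SPEC =====
def Spec_guardar_dado (dados_rolados : List Int) (dados_no_estoque : List Int) (dado_para_guardar : Int) (out : List (List Int)) : Prop := out = guardar_dado_alt dados_rolados dados_no_estoque dado_para_guardar
instance (dados_rolados : List Int) (dados_no_estoque : List Int) (dado_para_guardar : Int) (out : List (List Int)) : Decidable (Spec_guardar_dado dados_rolados dados_no_estoque dado_para_guardar out) := by unfold Spec_guardar_dado; infer_instance

-- ===== CLAIM (what is proved, stated in full; the proofs are below) =====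
def Claim_equal_guardar_dado : Prop := ∀ (dados_rolados : List Int) (dados_no_estoque : List Int) (dado_para_guardar : Int), Dom_guardar_dado dados_rolados dados_no_estoque dado_para_guardar → Spec_guardar_dado dados_rolados dados_no_estoque dado_para_guardar (guardar_dado dados_rolados dados_no_estoque dado_para_guardar)

-- ===== LEMMAS AND PROOFS =====

-- the enumerate form of A's loop step
def guardarStep' (dado_para_guardar : Int)
    (st : List Int × List Int) (p : Int × Int) : List Int × List Int :=
  if p.1 ≠ dado_para_guardar then (st.1 ++ [p.2], st.2) else (st.1, st.2 ++ [p.2])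

-- closed form of the loop over an enumerated suffix
theorem guardar_loop (d : Int) (r : List Int) : ∀ (s : Int) (acc e : List Int),
    (PySem.List.enumerate r s).foldl (guardarStep' d) (acc, e) =
      if s ≤ d ∧ d < s + r.length then
        (acc ++ r.take (d - s).toNat ++ r.drop ((d - s).toNat + 1),
         e ++ (r[(d - s).toNat]?).toList)
      else (acc ++ r, e) := by
  induction r with
  | nil =>
    intro s acc e
    simp [PySem.List.enumerate_nil]
  | cons x xs ih =>
    intro s acc e
    rw [PySem.List.enumerate_cons]
    simp only [List.foldl_cons]
    by_cases hs : s = d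
    · subst hs
      have hstep : guardarStep' s (acc, e) (s, x) = (acc, e ++ [x]) := by
        simp [guardarStep']
      rw [hstep, ih]
      have hc1 : ¬ (s + 1 ≤ s ∧ s < s + 1 + (xs.length : Int)) := by omega
      have hc2 : (s ≤ s ∧ s < s + ((x :: xs).length : Int)) := by
        simp
      rw [if_neg hc1, if_pos hc2]
      simp
    · have hstep : guardarStep' d (acc, e) (s, x) = (acc ++ [x], e) := by
        simp [guardarStep', hs]
      rw [hstep, ih]
      by_cases hc : s + 1 ≤ d ∧ d < s + 1 + (xs.length : Int)
      · have hc' : s ≤ d ∧ d < s + ((x :: xs).length : Int) := by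
          simp; omega
        rw [if_pos hc, if_pos hc']
        have hk : (d - s).toNat = (d - (s + 1)).toNat + 1 := by omega
        rw [hk]
        simp [List.take_succ_cons, List.drop_succ_cons]
      · have hc' : ¬ (s ≤ d ∧ d < s + ((x :: xs).length : Int)) := by
          simp; omega
        rw [if_neg hc, if_neg hc']
        simp

theorem guardar_dado_eq (r e : List Int) (d : Int) :
    guardar_dado r e d = guardar_dado_alt r e d := by
  unfold guardar_dado
  have hfold : (PySem.List.pyRange 0 (PySem.List.len r) 1).foldl
      (guardarStep r d) ([], e)
      = (PySem.List.enumerate r 0).foldl (guardarStep' d) ([], e) := by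
    rw [PySem.List.enumerate_eq_map_pyRange (d := 0), List.foldl_map]
    simp [PySem.List.len_eq]
    rfl
  rw [hfold, guardar_loop]
  unfold guardar_dado_alt
  simp only [PySem.List.len_eq]
  by_cases h : (0 : Int) ≤ d ∧ d < (r.length : Int)
  · rw [if_pos (by omega : (0:Int) ≤ d ∧ d < 0 + (r.length : Int)), if_pos h]
    have h1 : PySem.List.slice r none (some d) = r.take d.toNat :=
      PySem.List.slice_to r h.1
    have h2 : PySem.List.slice r (some (d + 1)) none = r.drop (d + 1).toNat :=
      PySem.List.slice_from r (by omega)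
    have hget : PySem.List.pyGet? r d = r[d.toNat]? := by
      simp only [PySem.List.pyGet?, PySem.List.pyIdx?, if_pos h.1, if_pos h.2]
      simp
    have hsub : (d - 0).toNat = d.toNat := by omega
    have hsucc : (d + 1).toNat = d.toNat + 1 := by omega
    rw [h1, h2, hget, hsub, hsucc]
    simp
  · rw [if_neg (by omega : ¬ ((0:Int) ≤ d ∧ d < 0 + (r.length : Int))), if_neg h]
    simp [PySem.List.slice]

-- ===== VERDICT (by name: the statement is the Claim_ definition above) =====
theorem guardar_dado_spec : Claim_equal_guardar_dado := by
  intro r e d _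
  unfold Spec_guardar_dado
  exact guardar_dado_eq r e d
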